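-- pv_equiv track=rewrite | github.com/user-11150/puel | src/uel/builder/token.py | idx_as_line_and_col
-- ===== SOURCE A (Python) =====
-- import typing as t
--
-- def idx_as_line_and_col(
--     source: str, idx: int
-- ) -> tuple[t.Union[int, None], t.Union[int, None]]:
--     line = 1
--     col = 1
--
--     if len(source) <= idx:
--         return None, None
--
--     for i in range(idx):
--         if source[i] == "\n":
--             line += 1
--             col = 1
--         else:
--             col += 1
--     return line, col
-- ===== SOURCE B (Python) =====
-- def idx_as_line_and_col(source, idx):
--     if len(source) <= idx:
--         return None, None
--     if idx <= 0:
--         return 1, 1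
--     before = source[:idx]
--     return before.count("\n") + 1, idx - before.rfind("\n")
-- ===== Notes on version B (the rewrite author's own statement) =====
-- stated objective: idiomatic
-- what changed: Replaces the explicit index loop carrying (line, col) accumulators by two built-in string scans of the prefix: line = before.count('\n') + 1 and col = idx - before.rfind('\n').
import Mathlib
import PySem

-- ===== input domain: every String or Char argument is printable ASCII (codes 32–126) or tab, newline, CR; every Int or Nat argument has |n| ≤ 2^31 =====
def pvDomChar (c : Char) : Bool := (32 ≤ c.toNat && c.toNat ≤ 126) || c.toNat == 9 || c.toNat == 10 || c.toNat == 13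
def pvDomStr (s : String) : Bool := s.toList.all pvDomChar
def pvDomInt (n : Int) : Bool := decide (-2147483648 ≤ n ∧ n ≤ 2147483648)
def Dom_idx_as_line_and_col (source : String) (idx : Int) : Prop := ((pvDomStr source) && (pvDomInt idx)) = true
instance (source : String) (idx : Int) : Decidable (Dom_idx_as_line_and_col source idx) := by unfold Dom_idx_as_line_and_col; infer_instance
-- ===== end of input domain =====

-- B replaces A's index loop over (line, col) accumulators by two built-in scans of the
-- prefix before idx (count of newlines, and rfind of the last newline); same cost, more idiomatic.

-- ===== PORT A =====
-- the loop body: one step of the (line, col) accumulator for one character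
def pvStepA (lc : Int × Int) (c : Char) : Int × Int :=
  if c = '\n' then (lc.1 + 1, 1) else (lc.1, lc.2 + 1)

def idx_as_line_and_col (source : String) (idx : Int) : Option Int × Option Int :=
  if PySem.Str.len source ≤ idx then (none, none)
  else
    -- for i in range(idx): source[i] is always in range here (0 ≤ i < idx < len), so pyGetD is exact
    (some ((PySem.List.pyRange 0 idx 1).foldl
        (fun lc i => pvStepA lc (PySem.List.pyGetD source.toList i ' ')) (1, 1)).1,
     some ((PySem.List.pyRange 0 idx 1).foldl
        (fun lc i => pvStepA lc (PySem.List.pyGetD source.toList i ' ')) (1, 1)).2)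

-- ===== PORT B =====
-- hand port of before.rfind("\n") for a single-character needle (exact: index of the last
-- occurrence, -1 if absent)
def pvRfindChar (cs : List Char) (c : Char) : Int :=
  match cs.reverse.findIdx? (· == c) with
  | none => -1
  | some k => (cs.length : Int) - 1 - (k : Int)

def idx_as_line_and_col_alt (source : String) (idx : Int) : Option Int × Option Int :=
  if PySem.Str.len source ≤ idx then (none, none)
  else if idx ≤ 0 then (some 1, some 1)
  else
    (some (((PySem.List.slice source.toList none (some idx)).count '\n' : Int) + 1),
     some (idx - pvRfindChar (PySem.List.slice source.toList none (some idx)) '\n'))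

-- ===== PRECONDITION & SPEC =====
def Spec_idx_as_line_and_col (source : String) (idx : Int) (out : Option Int × Option Int) : Prop := out = idx_as_line_and_col_alt source idx
instance (source : String) (idx : Int) (out : Option Int × Option Int) : Decidable (Spec_idx_as_line_and_col source idx out) := by unfold Spec_idx_as_line_and_col; infer_instance

-- ===== CLAIM (what is proved, stated in full; the proofs are below) =====
def Claim_equal_idx_as_line_and_col : Prop := ∀ (source : String) (idx : Int), Dom_idx_as_line_and_col source idx → Spec_idx_as_line_and_col source idx (idx_as_line_and_col source idx)

-- ===== LEMMAS AND PROOFS =====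

theorem pvRfindChar_append_self (l : List Char) (c : Char) :
    pvRfindChar (l ++ [c]) c = (l.length : Int) := by
  simp [pvRfindChar, List.findIdx?_cons]

theorem pvRfindChar_append_ne (l : List Char) (c c' : Char) (h : c' ≠ c) :
    pvRfindChar (l ++ [c']) c = pvRfindChar l c := by
  simp only [pvRfindChar, List.reverse_append, List.reverse_singleton, List.singleton_append,
    List.findIdx?_cons, beq_iff_eq, h, if_false]
  cases hf : l.reverse.findIdx? (· == c) with
  | none => simp
  | some k => simp; ring

theorem pvLoop_fst (l : List Char) (a b : Int) :
    (l.foldl pvStepA (a, b)).1 = a + (l.count '\n' : Int) := by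
  induction l generalizing a b with
  | nil => simp
  | cons c t ih =>
    by_cases hc : c = '\n'
    · simp [pvStepA, hc, ih]; ring
    · simp [pvStepA, hc, ih]

theorem pvLoop_snd (l : List Char) :
    (l.foldl pvStepA (1, 1)).2 = (l.length : Int) - pvRfindChar l '\n' := by
  induction l using List.reverseRecOn with
  | nil => simp [pvRfindChar]
  | append_singleton t c ih =>
    rw [List.foldl_append]
    by_cases hc : c = '\n'
    · subst hc
      simp [pvStepA, pvRfindChar_append_self]
    · simp only [List.foldl_cons, List.foldl_nil, pvStepA, hc, if_false,
        pvRfindChar_append_ne t '\n' c hc, ih, List.length_append, List.length_singleton]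
      push_cast; ring

theorem pvFoldl_pyRange_take {α β : Type} (xs : List α) (n : Nat) (hn : n ≤ xs.length)
    (d : α) (f : β → α → β) (init : β) :
    (PySem.List.pyRange 0 (n : Int) 1).foldl (fun acc j => f acc (PySem.List.pyGetD xs j d)) init
      = (xs.take n).foldl f init := by
  have hcongr : (PySem.List.pyRange 0 (n : Int) 1).foldl
      (fun acc j => f acc (PySem.List.pyGetD xs j d)) init
      = (PySem.List.pyRange 0 (n : Int) 1).foldl
      (fun acc j => f acc (PySem.List.pyGetD (xs.take n) j d)) init := by
    apply PySem.List.foldl_congr_mem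
    intro acc j hj
    rw [PySem.List.mem_pyRange_one] at hj
    have h0 : (0:Int) ≤ j := hj.1
    have hjn : j.toNat < n := by omega
    have hjlen : j < (xs.length : Int) := by omega
    have hjlen' : j < ((xs.take n).length : Int) := by simp; omega
    rw [PySem.List.pyGetD_eq_getElem xs d h0 hjlen,
        PySem.List.pyGetD_eq_getElem (xs.take n) d h0 hjlen']
    simp [List.getElem_take]
  rw [hcongr]
  have hlen2 : PySem.List.len (xs.take n) = (n : Int) := by
    rw [PySem.List.len_eq]; simp; omega
  rw [← hlen2]
  exact PySem.List.foldl_pyRange_zero_pyGetD _ _ _ _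

-- ===== VERDICT (by name: the statement is the Claim_ definition above) =====
theorem idx_as_line_and_col_spec : Claim_equal_idx_as_line_and_col := by
  intro source idx _
  unfold Spec_idx_as_line_and_col idx_as_line_and_col idx_as_line_and_col_alt
  split_ifs with hg h0
  · rfl
  · have : PySem.List.pyRange 0 idx 1 = [] := PySem.List.pyRange_one_eq_nil h0
    simp [this]
  · rw [PySem.Str.len_eq] at hg
    have hidx : idx = ((idx.toNat : Nat) : Int) := by omega
    have hlen : idx.toNat ≤ source.toList.length := by omega
    rw [hidx, PySem.List.slice_to source.toList (by omega)]
    simp only [Int.toNat_natCast]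
    rw [pvFoldl_pyRange_take source.toList idx.toNat hlen ' ' pvStepA (1, 1)]
    rw [pvLoop_fst, pvLoop_snd]
    have htk : ((source.toList.take idx.toNat).length : Int) = ((idx.toNat : Nat) : Int) := by
      rw [List.length_take]; congr 1; omega
    rw [htk, Int.add_comm]
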